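-- pv_equiv track=rewrite | github.com/JonasPinto/Diario-de-programacao | Udemy/python_language/exercicios_seção_6/ex026.py | proximo_multiplo
-- ===== SOURCE A (Python) =====
-- def proximo_multiplo(n):
--     while True:
--         n += 1
--         if n % 11 == 0:
--              return n, 11
--         elif n % 13 == 0:
--             return n, 13
--         elif n % 17 == 0:
--             return n, 17
-- ===== SOURCE B (Python) =====
-- def proximo_multiplo(n):
--     # closed form: for each divisor its next strict multiple; min is lexicographic,
--     # so ties on the multiple keep the 11 < 13 < 17 priority
--     return min(((n // d + 1) * d, d) for d in (11, 13, 17))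
-- ===== Notes on version B (the rewrite author's own statement) =====
-- stated objective: simpler
-- what changed: Replaces the incrementing while-loop with a closed-form next-multiple formula (n//d+1)*d per divisor and one lexicographic min over the three (multiple, divisor) pairs.
import Mathlib
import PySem

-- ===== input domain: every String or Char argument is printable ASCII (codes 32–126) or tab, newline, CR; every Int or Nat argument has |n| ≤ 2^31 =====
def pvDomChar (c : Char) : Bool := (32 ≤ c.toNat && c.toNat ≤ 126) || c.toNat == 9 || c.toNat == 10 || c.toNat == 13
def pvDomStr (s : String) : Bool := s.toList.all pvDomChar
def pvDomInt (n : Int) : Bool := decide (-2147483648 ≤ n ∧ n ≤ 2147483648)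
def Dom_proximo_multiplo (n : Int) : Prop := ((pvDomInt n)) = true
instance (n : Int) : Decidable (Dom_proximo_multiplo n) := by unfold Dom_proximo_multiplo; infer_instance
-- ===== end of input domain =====

-- B replaces A's incrementing while-loop by the closed-form next multiple (n//d+1)*d per
-- divisor and one lexicographic min over the three (multiple, divisor) pairs; objective: simpler.

-- termination measure lemma for port A's loop (cited by name in decreasing_by)
lemma pm_dec (n : Int) (h : PySem.Int.mod (n + 1) 11 ≠ 0) :
    (11 - PySem.Int.mod (n + 1) 11).toNat < (11 - PySem.Int.mod n 11).toNat := by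
  have h0 : PySem.Int.mod n 11 = n % 11 := PySem.Int.mod_eq_emod_of_pos (by norm_num)
  have h1 : PySem.Int.mod (n + 1) 11 = (n + 1) % 11 := PySem.Int.mod_eq_emod_of_pos (by norm_num)
  rw [h1] at h
  rw [h0, h1]
  omega

-- ===== PORT A =====
-- literal port of A's `while True: n += 1; if n % 11 == 0: return n, 11; elif …` loop
def proximo_multiplo (n : Int) : Int × Int :=
  let n' := n + 1
  if PySem.Int.mod n' 11 = 0 then (n', 11)
  else if PySem.Int.mod n' 13 = 0 then (n', 13)
  else if PySem.Int.mod n' 17 = 0 then (n', 17)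
  else proximo_multiplo n'
termination_by (11 - PySem.Int.mod n 11).toNat
decreasing_by
  exact pm_dec n (by assumption)

-- ===== PORT B =====
-- port of Source B: min(((n // d + 1) * d, d) for d in (11, 13, 17)); the list is nonempty,
-- so Python's min always returns a value and .getD's default is never reached
def proximo_multiplo_alt (n : Int) : Int × Int :=
  (PySem.List.min2?
    (([11, 13, 17] : List Int).map (fun d => ((PySem.Int.floordiv n d + 1) * d, d)))
    (fun p => p.1) (fun p => p.2)).getD (0, 0)

-- ===== PRECONDITION & SPEC =====
def Spec_proximo_multiplo (n : Int) (out : Int × Int) : Prop := out = proximo_multiplo_alt n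
instance (n : Int) (out : Int × Int) : Decidable (Spec_proximo_multiplo n out) := by unfold Spec_proximo_multiplo; infer_instance

-- ===== CLAIM (what is proved, stated in full; the proofs are below) =====
def Claim_equal_proximo_multiplo : Prop := ∀ (n : Int), Dom_proximo_multiplo n → Spec_proximo_multiplo n (proximo_multiplo n)

-- ===== LEMMAS AND PROOFS =====

lemma pm_mod11 (a : Int) : PySem.Int.mod a 11 = a % 11 := PySem.Int.mod_eq_emod_of_pos (by norm_num)
lemma pm_mod13 (a : Int) : PySem.Int.mod a 13 = a % 13 := PySem.Int.mod_eq_emod_of_pos (by norm_num)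
lemma pm_mod17 (a : Int) : PySem.Int.mod a 17 = a % 17 := PySem.Int.mod_eq_emod_of_pos (by norm_num)
lemma pm_div11 (a : Int) : PySem.Int.floordiv a 11 = a / 11 := PySem.Int.floordiv_eq_ediv_of_pos (by norm_num)
lemma pm_div13 (a : Int) : PySem.Int.floordiv a 13 = a / 13 := PySem.Int.floordiv_eq_ediv_of_pos (by norm_num)
lemma pm_div17 (a : Int) : PySem.Int.floordiv a 17 = a / 17 := PySem.Int.floordiv_eq_ediv_of_pos (by norm_num)

-- the next multiple of 11 wins the min when 11 divides n+1 (lexicographic tie-break)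
lemma alt_of_11 (n : Int) (h : (n + 1) % 11 = 0) : proximo_multiplo_alt n = (n + 1, 11) := by
  simp only [proximo_multiplo_alt, PySem.List.min2?, List.map, List.foldl,
    pm_div11, pm_div13, pm_div17]
  have e : (n / 11 + 1) * 11 = n + 1 := by omega
  split_ifs <;> dsimp only <;> (try split_ifs) <;> simp_all [Prod.ext_iff] <;> omega

lemma alt_of_13 (n : Int) (h11 : (n + 1) % 11 ≠ 0) (h : (n + 1) % 13 = 0) :
    proximo_multiplo_alt n = (n + 1, 13) := by
  simp only [proximo_multiplo_alt, PySem.List.min2?, List.map, List.foldl,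
    pm_div11, pm_div13, pm_div17]
  have e : (n / 13 + 1) * 13 = n + 1 := by omega
  split_ifs <;> dsimp only <;> (try split_ifs) <;> simp_all [Prod.ext_iff] <;> omega

lemma alt_of_17 (n : Int) (h11 : (n + 1) % 11 ≠ 0) (h13 : (n + 1) % 13 ≠ 0)
    (h : (n + 1) % 17 = 0) : proximo_multiplo_alt n = (n + 1, 17) := by
  simp only [proximo_multiplo_alt, PySem.List.min2?, List.map, List.foldl,
    pm_div11, pm_div13, pm_div17]
  have e : (n / 17 + 1) * 17 = n + 1 := by omega
  split_ifs <;> dsimp only <;> (try split_ifs) <;> simp_all [Prod.ext_iff] <;> omega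

-- the three closed forms are unchanged across a step that hits no divisor
lemma alt_step (n : Int) (h11 : (n + 1) % 11 ≠ 0) (h13 : (n + 1) % 13 ≠ 0)
    (h17 : (n + 1) % 17 ≠ 0) : proximo_multiplo_alt (n + 1) = proximo_multiplo_alt n := by
  simp only [proximo_multiplo_alt, PySem.List.min2?, List.map, List.foldl,
    pm_div11, pm_div13, pm_div17]
  have e11 : (n + 1) / 11 = n / 11 := by omega
  have e13 : (n + 1) / 13 = n / 13 := by omega
  have e17 : (n + 1) / 17 = n / 17 := by omega
  rw [e11, e13, e17]

lemma pm_main (n : Int) : proximo_multiplo n = proximo_multiplo_alt n := by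
  induction n using proximo_multiplo.induct with
  | case1 a b c =>
    have c' : (a + 1) % 11 = 0 := by rw [← pm_mod11]; exact c
    rw [proximo_multiplo]
    simp only [pm_mod11, pm_mod13, pm_mod17]
    rw [if_pos c']
    exact (alt_of_11 a c').symm
  | case2 a b c d =>
    have c' : (a + 1) % 11 ≠ 0 := by rw [← pm_mod11]; exact c
    have d' : (a + 1) % 13 = 0 := by rw [← pm_mod13]; exact d
    rw [proximo_multiplo]
    simp only [pm_mod11, pm_mod13, pm_mod17]
    rw [if_neg c', if_pos d']
    exact (alt_of_13 a c' d').symm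
  | case3 a b c d e =>
    have c' : (a + 1) % 11 ≠ 0 := by rw [← pm_mod11]; exact c
    have d' : (a + 1) % 13 ≠ 0 := by rw [← pm_mod13]; exact d
    have e' : (a + 1) % 17 = 0 := by rw [← pm_mod17]; exact e
    rw [proximo_multiplo]
    simp only [pm_mod11, pm_mod13, pm_mod17]
    rw [if_neg c', if_neg d', if_pos e']
    exact (alt_of_17 a c' d' e').symm
  | case4 a b c d e f =>
    have c' : (a + 1) % 11 ≠ 0 := by rw [← pm_mod11]; exact c
    have d' : (a + 1) % 13 ≠ 0 := by rw [← pm_mod13]; exact d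
    have e' : (a + 1) % 17 ≠ 0 := by rw [← pm_mod17]; exact e
    have f' : proximo_multiplo (a + 1) = proximo_multiplo_alt (a + 1) := f
    rw [proximo_multiplo]
    simp only [pm_mod11, pm_mod13, pm_mod17]
    rw [if_neg c', if_neg d', if_neg e', f', alt_step a c' d' e']

-- ===== VERDICT (by name: the statement is the Claim_ definition above) =====
theorem proximo_multiplo_spec : Claim_equal_proximo_multiplo := by
  intro n _
  unfold Spec_proximo_multiplo
  exact pm_main n
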